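-- pv_equiv track=rewrite | github.com/maplelinfy/mutations | aINb.py | a_in_b_region
-- ===== SOURCE A (Python) =====
-- def a_in_b_region(arr_a, arr_b):
--     arr_a = sorted(arr_a, key=lambda x: (x[0], x[1]))
--     arr_b = sorted(arr_b, key=lambda x: (x[0], x[1]))
--     index = 0
--     arr = []
--     for i in range(len(arr_a)):
--         chrr = arr_a[i][0]
--         pos = arr_a[i][1]
--         while (chrr == arr_b[index][0] and pos > arr_b[index][2]) or (chrr > arr_b[index][0]):
--             index += 1
--             if index == len(arr_b):
--                 break
--         if index < len(arr_b):
--             if chrr != arr_b[index][0] or pos < arr_b[index][1]: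
--                 continue
--             else:
--                 arr.append(arr_a[i])
--         else:
--             break
--     return arr
-- ===== SOURCE B (Python) =====
-- def a_in_b_region(arr_a, arr_b):
--     regions = {}
--     for chrom, start, end in arr_b:
--         regions.setdefault(chrom, []).append((start, end))
--     return [p for p in sorted(arr_a, key=lambda x: (x[0], x[1]))
--             if any(s <= p[1] <= e for s, e in regions.get(p[0], []))]
-- ===== Notes on version B (the rewrite author's own statement) =====
-- stated objective: alternative
-- what changed: Replaces the single monotonic two-pointer merge over both sorted arrays with a chromosome-indexed dict of (start,end) intervals built from arr_b and an independent any-containment test per sorted arr_a point.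
import Mathlib
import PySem

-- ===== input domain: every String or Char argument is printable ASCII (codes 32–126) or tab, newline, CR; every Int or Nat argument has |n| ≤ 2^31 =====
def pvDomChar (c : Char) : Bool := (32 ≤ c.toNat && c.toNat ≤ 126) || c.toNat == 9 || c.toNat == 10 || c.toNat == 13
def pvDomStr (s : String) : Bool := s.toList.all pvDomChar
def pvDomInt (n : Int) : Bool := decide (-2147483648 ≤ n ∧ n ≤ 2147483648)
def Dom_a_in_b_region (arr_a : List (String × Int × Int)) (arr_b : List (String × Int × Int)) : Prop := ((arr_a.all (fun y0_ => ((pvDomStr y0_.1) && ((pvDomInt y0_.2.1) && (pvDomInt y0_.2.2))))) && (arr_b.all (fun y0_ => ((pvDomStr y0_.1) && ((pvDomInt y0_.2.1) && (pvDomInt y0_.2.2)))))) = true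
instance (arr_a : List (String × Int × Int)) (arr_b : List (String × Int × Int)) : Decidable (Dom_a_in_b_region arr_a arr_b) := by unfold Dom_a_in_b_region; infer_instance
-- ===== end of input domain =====

-- B replaces A's two-pointer merge over both sorted arrays with a chromosome-indexed
-- dict of intervals and a per-point any-containment test (alternative algorithm, same cost class).

-- ===== PORT A =====
-- the `while` loop of A: advance `index` past intervals of earlier chromosomes, or of the
-- same chromosome ending before `pos`; the `index < length` guard makes the access total
-- (Python raises IndexError exactly when arr_b is empty, excluded by Pre_)
def pvAdvanceA (b : List (String × Int × Int)) (chrr : String) (pos : Int) (index : Nat) : Nat :=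
  if h : index < b.length then
    if (chrr == b[index].1 && decide (b[index].2.2 < pos)) || decide (b[index].1 < chrr) then
      pvAdvanceA b chrr pos (index + 1)
    else index
  else index
termination_by b.length - index
decreasing_by omega

-- the `for i in range(len(arr_a))` loop of A, over the sorted points, carrying `index` and `arr`
def pvLoopA (b : List (String × Int × Int)) :
    List (String × Int × Int) → Nat → List (String × Int × Int) → List (String × Int × Int)
  | [], _, arr => arr
  | p :: rest, index, arr =>
      let j := pvAdvanceA b p.1 p.2.1 index
      if hj : j < b.length then
        if p.1 ≠ b[j].1 ∨ p.2.1 < b[j].2.1 then pvLoopA b rest j arr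
        else pvLoopA b rest j (arr ++ [p])
      else arr

def a_in_b_region (arr_a : List (String × Int × Int)) (arr_b : List (String × Int × Int)) : List (String × Int × Int) :=
  pvLoopA (PySem.List.sorted2 arr_b (·.1) (·.2.1)) (PySem.List.sorted2 arr_a (·.1) (·.2.1)) 0 []

-- ===== PORT B =====
def a_in_b_region_alt (arr_a : List (String × Int × Int)) (arr_b : List (String × Int × Int)) : List (String × Int × Int) :=
  let regions : PySem.Dict String (List (Int × Int)) :=
    arr_b.foldl (fun d x => d.modify x.1 [] (fun v => v ++ [(x.2.1, x.2.2)])) PySem.Dict.empty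
  (PySem.List.sorted2 arr_a (·.1) (·.2.1)).filter
    (fun p => (regions.getD p.1 []).any (fun se => decide (se.1 ≤ p.2.1) && decide (p.2.1 ≤ se.2)))

-- ===== PRECONDITION & SPEC =====
-- Pre_ excludes exactly the inputs where Python A raises IndexError: arr_a non-empty with arr_b empty.
def Pre_a_in_b_region (arr_a : List (String × Int × Int)) (arr_b : List (String × Int × Int)) : Prop :=
  arr_a = [] ∨ arr_b ≠ []
instance (arr_a : List (String × Int × Int)) (arr_b : List (String × Int × Int)) : Decidable (Pre_a_in_b_region arr_a arr_b) := by unfold Pre_a_in_b_region; infer_instance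

def pvWitness_a_in_b_region : (List (String × Int × Int)) × (List (String × Int × Int)) :=
  ([("chr1", 5, 0), ("chr2", 1, 0)], [("chr1", 3, 7)])

def Spec_a_in_b_region (arr_a : List (String × Int × Int)) (arr_b : List (String × Int × Int)) (out : List (String × Int × Int)) : Prop := out = a_in_b_region_alt arr_a arr_b
instance (arr_a : List (String × Int × Int)) (arr_b : List (String × Int × Int)) (out : List (String × Int × Int)) : Decidable (Spec_a_in_b_region arr_a arr_b out) := by unfold Spec_a_in_b_region; infer_instance

-- ===== CLAIM (what is proved, stated in full; the proofs are below) =====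
def Claim_equal_a_in_b_region : Prop := ∀ (arr_a : List (String × Int × Int)) (arr_b : List (String × Int × Int)), Dom_a_in_b_region arr_a arr_b → Pre_a_in_b_region arr_a arr_b → Spec_a_in_b_region arr_a arr_b (a_in_b_region arr_a arr_b)
-- ===== LEMMAS AND PROOFS =====

-- `t` is "dead" for a point with chromosome c at position pos: earlier chromosome, or same
-- chromosome but the interval ends before pos.  A's while loop skips exactly dead intervals.
def pvDead (t : String × Int × Int) (c : String) (pos : Int) : Prop :=
  t.1 < c ∨ (t.1 = c ∧ t.2.2 < pos)

-- the containment predicate shared by both sides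
def pvContains (p t : String × Int × Int) : Bool :=
  (t.1 == p.1) && (decide (t.2.1 ≤ p.2.1) && decide (p.2.1 ≤ t.2.2))

-- the (chromosome, second component) lexicographic order both sorts use
def pvLE2 (p q : String × Int × Int) : Prop :=
  p.1 < q.1 ∨ (p.1 = q.1 ∧ p.2.1 ≤ q.2.1)

lemma pvDead_not_contains {t p : String × Int × Int} (h : pvDead t p.1 p.2.1) :
    pvContains p t = false := by
  rcases h with h | ⟨h1, h2⟩
  · simp [pvContains]
    intro he
    exact absurd (he ▸ h) (lt_irrefl _)
  · simp [pvContains]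
    intro _ _
    omega

lemma pvDead_mono {t p q : String × Int × Int} (h : pvDead t p.1 p.2.1) (hpq : pvLE2 p q) :
    pvDead t q.1 q.2.1 := by
  rcases h with h | ⟨h1, h2⟩ <;> rcases hpq with hh | ⟨hh1, hh2⟩
  · exact Or.inl (lt_trans h hh)
  · exact Or.inl (hh1 ▸ h)
  · exact Or.inl (h1 ▸ hh)
  · exact Or.inr ⟨h1.trans hh1, by omega⟩

lemma pvAdvanceA_spec (b : List (String × Int × Int)) (c : String) (pos : Int) (index : Nat) :
    index ≤ pvAdvanceA b c pos index ∧
    (index ≤ b.length → pvAdvanceA b c pos index ≤ b.length) ∧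
    (∀ k (hk : k < b.length), index ≤ k → k < pvAdvanceA b c pos index → pvDead b[k] c pos) ∧
    (∀ (hj : pvAdvanceA b c pos index < b.length),
        ¬ b[pvAdvanceA b c pos index].1 < c ∧
        (b[pvAdvanceA b c pos index].1 = c → pos ≤ b[pvAdvanceA b c pos index].2.2)) := by
  fun_induction pvAdvanceA b c pos index with
  | case1 index h hcond ih =>
    obtain ⟨ih1, ih2, ih3, ih4⟩ := ih
    refine ⟨by omega, fun _ => ih2 (by omega), ?_, ih4⟩
    intro k hk hk1 hk2
    rcases Nat.eq_or_lt_of_le hk1 with rfl | hlt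
    · simp only [Bool.or_eq_true, Bool.and_eq_true, beq_iff_eq, decide_eq_true_eq] at hcond
      rcases hcond with ⟨h1, h2⟩ | h1
      · exact Or.inr ⟨h1.symm, h2⟩
      · exact Or.inl h1
    · exact ih3 k hk hlt hk2
  | case2 index h hcond =>
    refine ⟨le_refl _, fun h' => h', fun k hk hk1 hk2 => absurd hk1 (by omega), ?_⟩
    intro hj
    simp only [Bool.or_eq_true, Bool.and_eq_true, beq_iff_eq, decide_eq_true_eq, not_or,
      not_and] at hcond
    exact ⟨hcond.2, fun he => by have := hcond.1 he.symm; omega⟩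
  | case3 index h =>
    exact ⟨le_refl _, fun h' => h', fun k hk hk1 hk2 => absurd hk2 (by omega),
      fun hj => absurd hj h⟩

lemma pvLoopA_eq (b : List (String × Int × Int)) (hb : b.Pairwise pvLE2) :
    ∀ (pts : List (String × Int × Int)), pts.Pairwise pvLE2 →
    ∀ (index : Nat) (acc : List (String × Int × Int)), index ≤ b.length →
    (∀ k (hk : k < b.length), k < index → ∀ p ∈ pts, pvDead b[k] p.1 p.2.1) →
    pvLoopA b pts index acc = acc ++ pts.filter (fun p => b.any (pvContains p)) := by
  intro pts
  induction pts with
  | nil => intro _ index acc _ _; simp [pvLoopA]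
  | cons p rest ih =>
    intro hpw index acc hidx hdead
    obtain ⟨hp_rest, hrest_pw⟩ := List.pairwise_cons.mp hpw
    obtain ⟨hadv_ge, hadv_le, hskip, hstop⟩ := pvAdvanceA_spec b p.1 p.2.1 index
    set j := pvAdvanceA b p.1 p.2.1 index with hjdef
    have hjle : j ≤ b.length := hadv_le hidx
    -- every interval strictly before j is dead for p and for everything after p
    have hdead_j : ∀ k (hk : k < b.length), k < j → ∀ q ∈ p :: rest, pvDead b[k] q.1 q.2.1 := by
      intro k hk hkj q hq
      rcases Nat.lt_or_ge k index with hki | hki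
      · exact hdead k hk hki q hq
      · have hdp : pvDead b[k] p.1 p.2.1 := hskip k hk hki hkj
        rcases List.mem_cons.mp hq with rfl | hq'
        · exact hdp
        · exact pvDead_mono hdp (hp_rest q hq')
    rw [pvLoopA]
    by_cases hj : j < b.length
    · rw [dif_pos hj]
      by_cases hcond : p.1 ≠ b[j].1 ∨ p.2.1 < b[j].2.1
      · -- continue: p matches nothing in b
        rw [if_pos hcond]
        have hanyp : b.any (pvContains p) = false := by
          rw [Bool.eq_false_iff]
          intro hany
          obtain ⟨t, ht, hct⟩ := List.any_eq_true.mp hany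
          obtain ⟨k, hk, rfl⟩ := List.mem_iff_getElem.mp ht
          rcases Nat.lt_trichotomy k j with hkj | rfl | hkj
          · rw [pvDead_not_contains (hdead_j k hk hkj p (List.mem_cons_self))] at hct
            exact Bool.false_ne_true hct
          · simp only [pvContains, Bool.and_eq_true, beq_iff_eq, decide_eq_true_eq] at hct
            rcases hcond with hc | hc
            · exact hc hct.1.symm
            · omega
          · have hle2 : pvLE2 b[j] b[k] :=
              (List.pairwise_iff_getElem.mp hb) j k hj hk hkj
            simp only [pvContains, Bool.and_eq_true, beq_iff_eq, decide_eq_true_eq] at hct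
            obtain ⟨hc1, hc2, hc3⟩ := hct
            obtain ⟨hs1, hs2⟩ := hstop hj
            rcases lt_or_eq_of_le (not_lt.mp hs1) with hgt | heq
            · -- p.1 < b[j].1 ≤ b[k].1 contradicts b[k].1 = p.1
              rcases hle2 with hh | ⟨hh, _⟩
              · exact absurd (hc1 ▸ (lt_trans hgt hh)) (lt_irrefl _)
              · exact absurd (hc1 ▸ (hh ▸ hgt)) (lt_irrefl _)
            · -- p.1 = b[j].1: the branch gives p.2.1 < b[j].2.1 ≤ b[k].2.1, contradiction
              have hc' : p.2.1 < b[j].2.1 := by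
                rcases hcond with hc | hc
                · exact absurd heq hc
                · exact hc
              rcases hle2 with hh | ⟨hh, hh2⟩
              · exact absurd (hc1 ▸ (heq ▸ hh)) (lt_irrefl _)
              · omega
        rw [ih hrest_pw j acc hjle (fun k hk hkj q hq => hdead_j k hk hkj q (List.mem_cons_of_mem _ hq))]
        simp [hanyp]
      · -- append: p is contained in b[j]
        rw [if_neg hcond]
        push Not at hcond
        obtain ⟨hc1, hc2⟩ := hcond
        have hend : p.2.1 ≤ b[j].2.2 := (hstop hj).2 hc1.symm
        have hanyp : b.any (pvContains p) = true :=
          List.any_eq_true.mpr ⟨b[j], List.getElem_mem hj, by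
            simp [pvContains, hc1.symm, hc2, hend]⟩
        rw [ih hrest_pw j (acc ++ [p]) hjle (fun k hk hkj q hq => hdead_j k hk hkj q (List.mem_cons_of_mem _ hq))]
        simp [hanyp]
    · -- index ran off the end: everything left is dead
      rw [dif_neg hj]
      have hjeq : j = b.length := by omega
      have : List.filter (fun p => b.any (pvContains p)) (p :: rest) = [] := by
        rw [List.filter_eq_nil_iff]
        intro q hq
        simp only [Bool.not_eq_true]
        rw [Bool.eq_false_iff]
        intro hany
        obtain ⟨t, ht, hct⟩ := List.any_eq_true.mp hany
        obtain ⟨k, hk, rfl⟩ := List.mem_iff_getElem.mp ht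
        rw [pvDead_not_contains (hdead_j k hk (hjeq ▸ hk) q hq)] at hct
        exact Bool.false_ne_true hct
      rw [this]
      simp

-- B's grouping dict, looked up at chromosome c, is exactly arr_b's intervals with that chromosome
lemma pvRegions_getD (l : List (String × Int × Int)) (d : PySem.Dict String (List (Int × Int))) (c : String) :
    (l.foldl (fun d x => d.modify x.1 [] (fun v => v ++ [(x.2.1, x.2.2)])) d).getD c []
      = d.getD c [] ++ (l.filter (fun x => x.1 == c)).map (fun x => (x.2.1, x.2.2)) := by
  induction l generalizing d with
  | nil => simp
  | cons x l ih =>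
    rw [List.foldl_cons, ih]
    by_cases hx : x.1 = c
    · subst hx
      rw [PySem.Dict.getD_modify_self]
      simp
    · rw [PySem.Dict.getD_modify_of_ne d [] _ (fun h => hx h.symm)]
      simp [hx]

lemma pvAlt_pred (arr_b : List (String × Int × Int)) (p : String × Int × Int) :
    ((arr_b.foldl (fun d x => d.modify x.1 [] (fun v => v ++ [(x.2.1, x.2.2)])) PySem.Dict.empty).getD p.1 []).any
        (fun se => decide (se.1 ≤ p.2.1) && decide (p.2.1 ≤ se.2))
      = arr_b.any (pvContains p) := by
  rw [pvRegions_getD, PySem.Dict.getD_empty, List.nil_append, List.any_map, List.any_filter]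
  congr 1

-- Python's key=(x[0], x[1]) is the lexicographic order: sorted2 equals sorted with a Lex key
lemma pvSorted2_eq_sorted_lex (xs : List (String × Int × Int)) :
    PySem.List.sorted2 xs (·.1) (·.2.1) = PySem.List.sorted xs (fun x => toLex (x.1, x.2.1)) := by
  unfold PySem.List.sorted2 PySem.List.sorted
  simp only [Bool.false_eq_true, if_false]
  congr 1
  funext acc x
  congr 1
  funext a bb
  rcases lt_trichotomy a.1 bb.1 with h | h | h
  · simp [h, Prod.Lex.toLex_lt_toLex]
  · simp [h, Prod.Lex.toLex_lt_toLex]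
  · simp [h, asymm h, h.ne', Prod.Lex.toLex_lt_toLex]

lemma pvSorted2_pairwise (xs : List (String × Int × Int)) :
    (PySem.List.sorted2 xs (·.1) (·.2.1)).Pairwise pvLE2 := by
  rw [pvSorted2_eq_sorted_lex]
  have := PySem.List.sorted_pairwise xs (fun x => toLex (x.1, x.2.1))
  refine this.imp ?_
  intro a bb h
  rw [Prod.Lex.toLex_le_toLex] at h
  exact h

-- ===== VERDICT (by name: the statement is the Claim_ definition above) =====
theorem a_in_b_region_spec : Claim_equal_a_in_b_region := by
  intro arr_a arr_b _ _
  unfold Spec_a_in_b_region a_in_b_region a_in_b_region_alt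
  rw [pvLoopA_eq (PySem.List.sorted2 arr_b (·.1) (·.2.1)) (pvSorted2_pairwise arr_b)
        (PySem.List.sorted2 arr_a (·.1) (·.2.1)) (pvSorted2_pairwise arr_a) 0 []
        (Nat.zero_le _) (fun k hk hki _ _ => absurd hki (by omega)),
      List.nil_append]
  apply List.filter_congr
  intro p _
  rw [pvAlt_pred]
  exact (PySem.List.sorted2_perm arr_b (·.1) (·.2.1) false).any_eq
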